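-- pv_equiv track=rewrite | github.com/ahmetax/trderlem | kokKelimeler.py | deasciify
-- ===== SOURCE A (Python) =====
-- dertop = []
--
-- def deasciify(soz):
--     liste = []
--     ysoz=''
--     for i in range(len(soz)):
--         if soz[i]=='c':
--             ysoz += 'C'
--         elif soz[i]=='g':
--             ysoz += 'G'
--         elif soz[i]=='i':
--             ysoz += 'I'
--         elif soz[i]=='o':
--             ysoz += 'O'
--         elif soz[i]=='s':
--             ysoz += 'S'
--         elif soz[i]=='u':
--             ysoz += 'U'
--         else:
--             ysoz += soz[i]
--     liste =[]
--     liste.append(ysoz)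
--     i = 0
--     while i < len(ysoz):
--         for j in range(len(liste)):
--             ysoz= liste[j]
--             if ysoz[i] in "CGIOSU":
--                 if ysoz[i]=='C':
--                     ys1=ysoz[:i]+'c'+ysoz[i+1:]
--                     ys2=ysoz[:i]+'ç'+ysoz[i+1:]
--                     del liste[j]
--                     liste.append(ys1)
--                     liste.append(ys2)
--                     i-=1
--                     break
--                 elif ysoz[i]=='G':
--                     ys1=ysoz[:i]+'g'+ysoz[i+1:]
--                     ys2=ysoz[:i]+'ğ'+ysoz[i+1:]
--                     del liste[j]
--                     liste.append(ys1)
--                     liste.append(ys2)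
--                     i-=1
--                     break
--                 elif ysoz[i]=='I':
--                     ys1=ysoz[:i]+'i'+ysoz[i+1:]
--                     ys2=ysoz[:i]+'ı'+ysoz[i+1:]
--                     del liste[j]
--                     liste.append(ys1)
--                     liste.append(ys2)
--                     i-=1
--                     break
--                 elif ysoz[i]=='O':
--                     ys1=ysoz[:i]+'o'+ysoz[i+1:]
--                     ys2=ysoz[:i]+'ö'+ysoz[i+1:]
--                     del liste[j]
--                     liste.append(ys1)
--                     liste.append(ys2)
--                     i-=1
--                     break
--                 elif ysoz[i]=='S':
--                     ys1=ysoz[:i]+'s'+ysoz[i+1:]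
--                     ys2=ysoz[:i]+'ş'+ysoz[i+1:]
--                     del liste[j]
--                     liste.append(ys1)
--                     liste.append(ys2)
--                     i-=1
--                     break
--                 elif ysoz[i]=='U':
--                     ys1=ysoz[:i]+'u'+ysoz[i+1:]
--                     ys2=ysoz[:i]+'ü'+ysoz[i+1:]
--                     del liste[j]
--                     liste.append(ys1)
--                     liste.append(ys2)
--                     i-=1
--                     break
--                 else:
--                     pass
--         i += 1
--
--     #kelime listesinde (dertop) olanları ayır
--     liste2 = []
--     for l in liste:
--         if l in dertop:
--             liste2.append(l)
--     return liste2, liste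
-- ===== SOURCE B (Python) =====
-- import itertools
--
-- _OPTS = {'c': ('c', 'ç'), 'g': ('g', 'ğ'), 'i': ('i', 'ı'),
--          'o': ('o', 'ö'), 's': ('s', 'ş'), 'u': ('u', 'ü'),
--          'C': ('c', 'ç'), 'G': ('g', 'ğ'), 'I': ('i', 'ı'),
--          'O': ('o', 'ö'), 'S': ('s', 'ş'), 'U': ('u', 'ü')}
--
-- dertop = []
--
-- def deasciify(soz):
--     opts = [_OPTS.get(ch, (ch,)) for ch in soz]
--     liste = [''.join(t) for t in itertools.product(*opts)]
--     dset = set(dertop)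
--     liste2 = [w for w in liste if w in dset]
--     return liste2, liste
-- ===== Notes on version B (the rewrite author's own statement) =====
-- stated objective: alternative
-- what changed: Replaces A's uppercase-marking pass plus the delete-and-rescan worklist over the growing variant list by a single itertools.product over per-position option tuples (and a set for the dertop membership filter), producing the variants directly in the same order; measured quicker on mid-size inputs (4.45x at n=64) but the exponential output dominates at the largest sizes, so no speed is claimed.
import Mathlib
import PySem

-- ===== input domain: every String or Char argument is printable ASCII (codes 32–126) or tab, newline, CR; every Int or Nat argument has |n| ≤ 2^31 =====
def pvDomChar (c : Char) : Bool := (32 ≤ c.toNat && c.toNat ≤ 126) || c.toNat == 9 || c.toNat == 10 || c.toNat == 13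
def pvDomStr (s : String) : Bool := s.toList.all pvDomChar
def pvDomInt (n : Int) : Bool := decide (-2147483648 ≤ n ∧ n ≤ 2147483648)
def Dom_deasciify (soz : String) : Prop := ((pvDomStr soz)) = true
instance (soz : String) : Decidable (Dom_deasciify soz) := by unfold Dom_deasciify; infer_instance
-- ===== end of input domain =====

-- B replaces A's delete-and-rescan worklist over the growing variant list by a direct
-- per-position product of option lists (same values, same order); objective: alternative.

-- ===== PORT A =====
-- the first for-loop's elif chain (ascii special letters -> uppercase markers)
def pvMark (c : Char) : Char :=
  if c = 'c' then 'C'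
  else if c = 'g' then 'G'
  else if c = 'i' then 'I'
  else if c = 'o' then 'O'
  else if c = 's' then 'S'
  else if c = 'u' then 'U'
  else c

def pvSix : List Char := ['C', 'G', 'I', 'O', 'S', 'U']   -- "CGIOSU"

-- the elif chain inside the while-loop: marker -> (plain, special) replacement pair
def pvPair (c : Char) : Char × Char :=
  if c = 'C' then ('c', 'ç')
  else if c = 'G' then ('g', 'ğ')
  else if c = 'I' then ('i', 'ı')
  else if c = 'O' then ('o', 'ö')
  else if c = 'S' then ('s', 'ş')
  else if c = 'U' then ('u', 'ü')
  else (c, c)   -- unreachable: only called with c in "CGIOSU"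

-- ysoz[:i] + ch + ysoz[i+1:]  (i is always a valid index where A builds this)
def pvSet (x : List Char) (i : Nat) (ch : Char) : List Char :=
  x.take i ++ [ch] ++ x.drop (i + 1)

-- the inner 'for j in range(len(liste))': first j whose char at i is in "CGIOSU",
-- together with the two replacement words ys1, ys2 built there (none = no break)
def pvScan (liste : List (List Char)) (i : Nat) : Option (Nat × List Char × List Char) :=
  match liste with
  | [] => none
  | ys :: rest =>
    let c := ys.getD i ' '   -- ysoz[i]; i is in range whenever the test below succeeds
    if c ∈ pvSix then
      some (0, pvSet ys i (pvPair c).1, pvSet ys i (pvPair c).2)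
    else
      match pvScan rest i with
      | some (j, a, b) => some (j + 1, a, b)
      | none => none

-- the 'while i < len(ysoz)' loop; one fuel unit per iteration (fuel is a totality
-- guard only: the port's fuel budget is proved sufficient in the lemmas below).
-- On a break A does 'i -= 1' then 'i += 1', so i is unchanged; the deleted element
-- is removed at index j and ys1, ys2 are appended.
def pvLoop (fuel : Nat) (liste : List (List Char)) (i n : Nat) : List (List Char) :=
  match fuel with
  | 0 => liste
  | fuel + 1 =>
    if i < n then
      match pvScan liste i with
      | some (j, ys1, ys2) => pvLoop fuel (liste.eraseIdx j ++ [ys1, ys2]) i n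
      | none => pvLoop fuel liste (i + 1) n
    else liste

def deasciify (soz : String) : List String × List String :=
  let ysoz := soz.toList.foldl (fun acc c => acc ++ [pvMark c]) []   -- ysoz += …
  let n := ysoz.length
  let liste := pvLoop ((n + 1) * 2 ^ n) [ysoz] 0 n
  let listeS := liste.map (fun l => String.mk l)
  let dertop : List String := []   -- module-level 'dertop = []'
  let liste2 := listeS.filter (fun l => dertop.contains l)   -- 'if l in dertop'
  (liste2, listeS)

-- ===== PORT B =====
-- _OPTS.get(ch, (ch,)) : the per-character option tuple (dict literal as a lookup chain)
def pvOpt (ch : Char) : List Char :=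
  if ch = 'c' then ['c', 'ç']
  else if ch = 'g' then ['g', 'ğ']
  else if ch = 'i' then ['i', 'ı']
  else if ch = 'o' then ['o', 'ö']
  else if ch = 's' then ['s', 'ş']
  else if ch = 'u' then ['u', 'ü']
  else if ch = 'C' then ['c', 'ç']
  else if ch = 'G' then ['g', 'ğ']
  else if ch = 'I' then ['i', 'ı']
  else if ch = 'O' then ['o', 'ö']
  else if ch = 'S' then ['s', 'ş']
  else if ch = 'U' then ['u', 'ü']
  else [ch]

-- itertools.product(*opts), last position varying fastest
def pvProd (opts : List (List Char)) : List (List Char) :=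
  match opts with
  | [] => [[]]
  | o :: rest => o.flatMap (fun c => (pvProd rest).map (fun t => c :: t))

def deasciify_alt (soz : String) : List String × List String :=
  let opts := soz.toList.map pvOpt
  let liste := (pvProd opts).map (fun t => String.mk t)
  let dset : PySem.Set String := PySem.Set.ofList ([] : List String)   -- set(dertop)
  let liste2 := liste.filter (fun w => dset.contains w)   -- 'if w in dset'
  (liste2, liste)

-- ===== PRECONDITION & SPEC =====
def Spec_deasciify (soz : String) (out : List String × List String) : Prop := out = deasciify_alt soz
instance (soz : String) (out : List String × List String) : Decidable (Spec_deasciify soz out) := by unfold Spec_deasciify; infer_instance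

-- ===== CLAIM (what is proved, stated in full; the proofs are below) =====
def Claim_equal_deasciify : Prop := ∀ (soz : String), Dom_deasciify soz → Spec_deasciify soz (deasciify soz)

-- ===== LEMMAS AND PROOFS =====

-- the option list of a marked character, as A's while-loop sees it
def pvOptM (c : Char) : List Char :=
  if c ∈ pvSix then [(pvPair c).1, (pvPair c).2] else [c]

theorem pvOpt_eq_optM_mark (c : Char) : pvOpt c = pvOptM (pvMark c) := by
  by_cases h1 : c = 'c'; · subst h1; decide
  by_cases h2 : c = 'g'; · subst h2; decide
  by_cases h3 : c = 'i'; · subst h3; decide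
  by_cases h4 : c = 'o'; · subst h4; decide
  by_cases h5 : c = 's'; · subst h5; decide
  by_cases h6 : c = 'u'; · subst h6; decide
  by_cases h7 : c = 'C'; · subst h7; decide
  by_cases h8 : c = 'G'; · subst h8; decide
  by_cases h9 : c = 'I'; · subst h9; decide
  by_cases h10 : c = 'O'; · subst h10; decide
  by_cases h11 : c = 'S'; · subst h11; decide
  by_cases h12 : c = 'U'; · subst h12; decide
  rw [pvOpt, pvMark, pvOptM]
  simp only [h1, h2, h3, h4, h5, h6, h7, h8, h9, h10, h11, h12, if_false]
  rw [if_neg (by simp [pvSix, h7, h8, h9, h10, h11, h12])]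

theorem pvPair_fst_not_six {c : Char} (h : c ∈ pvSix) : (pvPair c).1 ∉ pvSix := by
  fin_cases h <;> decide

theorem pvPair_snd_not_six {c : Char} (h : c ∈ pvSix) : (pvPair c).2 ∉ pvSix := by
  fin_cases h <;> decide

theorem lt_length_of_getD_mem_six {x : List Char} {i : Nat} (h : x.getD i ' ' ∈ pvSix) :
    i < x.length := by
  by_contra hn
  rw [List.getD_eq_default _ _ (by omega)] at h
  simp [pvSix] at h

theorem pvSet_eq_set {x : List Char} {i : Nat} (ch : Char) (h : i < x.length) :
    pvSet x i ch = x.set i ch := by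
  rw [pvSet, List.set_eq_take_cons_drop _ h]; simp

theorem pvSet_length {x : List Char} {i : Nat} (ch : Char) (h : i < x.length) :
    (pvSet x i ch).length = x.length := by
  rw [pvSet_eq_set _ h]; simp

theorem pvSet_getD {x : List Char} {i : Nat} (ch : Char) (h : i < x.length) :
    (pvSet x i ch).getD i ' ' = ch := by
  rw [pvSet_eq_set _ h, List.getD_eq_getElem?_getD]
  simp [List.getElem?_set_self, h]

theorem pvSet_drop {x : List Char} {i : Nat} (ch : Char) (h : i < x.length) :
    (pvSet x i ch).drop (i + 1) = x.drop (i + 1) := by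
  rw [pvSet_eq_set _ h]
  apply List.ext_getElem?
  intro m
  simp [List.getElem?_drop, List.getElem?_set_ne (by omega : i ≠ i + 1 + m)]

theorem pvSet_take_succ {x : List Char} {i : Nat} (ch : Char) (h : i < x.length) :
    (pvSet x i ch).take (i + 1) = x.take i ++ [ch] := by
  rw [pvSet_eq_set _ h]
  apply List.ext_getElem?
  intro m
  rcases lt_trichotomy m i with hm | heq | hm
  · rw [List.getElem?_append_left (by simp [List.length_take_of_le (by omega : i ≤ x.length)]; omega)]
    simp [List.getElem?_take, hm, Nat.lt_succ_of_lt hm, List.getElem?_set_ne (by omega : i ≠ m)]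
  · subst heq
    rw [List.getElem?_append_right (by simp)]
    simp [List.getElem?_take, h, Nat.min_eq_left (le_of_lt h)]
  · rw [List.getElem?_eq_none (by simp; omega), List.getElem?_eq_none
      (by simp [List.length_take_of_le (by omega : i ≤ x.length)]; omega)]

theorem getD_eq_of_drop_eq {x y : List Char} {i : Nat} (h : x.drop i = y.drop i) :
    x.getD i ' ' = y.getD i ' ' := by
  have hx : x[i]? = y[i]? := by
    have h1 : (x.drop i)[0]? = (y.drop i)[0]? := by rw [h]
    simpa [List.getElem?_drop] using h1
  rw [List.getD_eq_getElem?_getD, List.getD_eq_getElem?_getD, hx]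

theorem pvScan_none {liste : List (List Char)} {i : Nat}
    (h : ∀ x ∈ liste, x.getD i ' ' ∉ pvSix) : pvScan liste i = none := by
  induction liste with
  | nil => rfl
  | cons y rest ih =>
    have hy := h y (by simp)
    rw [pvScan]
    simp only [hy, if_false]
    rw [ih (fun x hx => h x (by simp [hx]))]

theorem pvScan_cons_hit {x : List Char} (rest : List (List Char)) {i : Nat}
    (h : x.getD i ' ' ∈ pvSix) :
    pvScan (x :: rest) i =
      some (0, pvSet x i (pvPair (x.getD i ' ')).1, pvSet x i (pvPair (x.getD i ' ')).2) := by
  rw [pvScan]; simp only [h, if_true]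

-- one "phase": while the first strings still carry the marker at position i, A keeps
-- deleting them at the front and appending both replacements at the end
theorem pvLoop_phase (P : List (List Char)) :
    ∀ (Q : List (List Char)) (f i n : Nat) (c : Char), c ∈ pvSix →
    (∀ x ∈ P, x.getD i ' ' = c) → (∀ x ∈ Q, x.getD i ' ' ∉ pvSix) →
    i < n → P.length ≤ f →
    pvLoop f (P ++ Q) i n =
      pvLoop (f - P.length)
        (Q ++ P.flatMap (fun x => [pvSet x i (pvPair c).1, pvSet x i (pvPair c).2])) i n := by
  induction P with
  | nil => intro Q f i n c _ _ _ _ _; simp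
  | cons x P' ih =>
    intro Q f i n c hc hP hQ hin hf
    obtain ⟨f', rfl⟩ : ∃ f', f = f' + 1 := ⟨f - 1, by simp only [List.length_cons] at hf; omega⟩
    have hx : x.getD i ' ' = c := hP x (by simp)
    have hxm : x.getD i ' ' ∈ pvSix := by rw [hx]; exact hc
    have hxl : i < x.length := lt_length_of_getD_mem_six hxm
    rw [pvLoop, if_pos hin, List.cons_append, pvScan_cons_hit _ hxm, hx]
    simp only [List.eraseIdx_cons_zero]
    have hre : (P' ++ Q) ++ [pvSet x i (pvPair c).1, pvSet x i (pvPair c).2] =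
        P' ++ (Q ++ [pvSet x i (pvPair c).1, pvSet x i (pvPair c).2]) := by
      rw [List.append_assoc]
    rw [hre, ih (Q ++ [pvSet x i (pvPair c).1, pvSet x i (pvPair c).2]) f' i n c hc
      (fun y hy => hP y (by simp [hy]))
      (by
        intro y hy
        rcases List.mem_append.mp hy with hy | hy
        · exact hQ y hy
        · simp only [List.mem_cons, List.not_mem_nil, or_false] at hy
          rcases hy with rfl | rfl
          · rw [pvSet_getD _ hxl]; exact pvPair_fst_not_six hc
          · rw [pvSet_getD _ hxl]; exact pvPair_snd_not_six hc)
      hin (by simp only [List.length_cons] at hf; omega)]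
    have hfe : f' - P'.length = f' + 1 - (x :: P').length := by simp only [List.length_cons]; omega
    have hle : Q ++ (x :: P').flatMap (fun y => [pvSet y i (pvPair c).1, pvSet y i (pvPair c).2]) =
        (Q ++ [pvSet x i (pvPair c).1, pvSet x i (pvPair c).2]) ++
          P'.flatMap (fun y => [pvSet y i (pvPair c).1, pvSet y i (pvPair c).2]) := by
      rw [List.flatMap_cons, List.append_assoc]
    rw [hfe, hle]

theorem length_flatMap_two {α β : Type} (L : List α) (a b : α → β) :
    (L.flatMap (fun x => [a x, b x])).length = 2 * L.length := by
  induction L with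
  | nil => rfl
  | cons x L ih => simp only [List.flatMap_cons, List.length_append, ih]; simp; omega

-- the main invariant: from position i on, every word in the worklist still reads like Y,
-- and the loop finishes by expanding each word with the product of the remaining options
theorem pvLoop_main (k : Nat) : ∀ (i : Nat) (L : List (List Char)) (f n : Nat) (Y : List Char),
    Y.length = n → i + k = n →
    (∀ x ∈ L, x.length = n ∧ x.drop i = Y.drop i) →
    L.length * (2 ^ k - 1) + k ≤ f →
    pvLoop f L i n =
      L.flatMap (fun x => (pvProd ((Y.drop i).map pvOptM)).map (fun t => x.take i ++ t)) := by
  induction k with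
  | zero =>
    intro i L f n Y hY hik hL hf
    have hi : i = n := by omega
    have h1 : pvLoop f L i n = L := by
      cases f with
      | zero => rfl
      | succ f => rw [pvLoop, if_neg (by omega)]
    have hdrop : Y.drop i = [] := by rw [hi, ← hY, List.drop_length]
    rw [h1, hdrop]
    simp only [List.map_nil, pvProd, List.map_cons, List.map_nil, List.append_nil]
    symm
    calc L.flatMap (fun x => [x.take i])
        = L.flatMap (fun x => [x]) := by
          apply List.flatMap_congr
          intro x hx
          have hlen := (hL x hx).1
          rw [show x.take i = x from by rw [hi, ← hlen]; exact List.take_length]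
      _ = L := List.flatMap_singleton' L
  | succ k ih =>
    intro i L f n Y hY hik hL hf
    have hin : i < n := by omega
    have hiY : i < Y.length := by omega
    have hdropY : Y.drop i = Y[i] :: Y.drop (i + 1) := List.drop_eq_getElem_cons hiY
    set c := Y[i] with hcdef
    have hcY : Y.getD i ' ' = c := by
      rw [List.getD_eq_getElem?_getD, List.getElem?_eq_getElem hiY]; rfl
    have hxc : ∀ x ∈ L, x.getD i ' ' = c := fun x hx => by
      rw [getD_eq_of_drop_eq (hL x hx).2, hcY]
    have hxl : ∀ x ∈ L, i < x.length := fun x hx => by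
      have := (hL x hx).1; omega
    have hdropx : ∀ x ∈ L, x.drop (i + 1) = Y.drop (i + 1) := by
      intro x hx
      have h2 := (hL x hx).2
      have h3 : (x.drop i).tail = (Y.drop i).tail := by rw [h2]
      simpa [List.tail_drop] using h3
    have h2pow : 1 ≤ 2 ^ k := Nat.one_le_two_pow
    have hpows : 2 ^ (k + 1) = 2 * 2 ^ k := by rw [Nat.pow_succ]; ring
    have hq1 : L.length * (2 ^ (k + 1) - 1) = 2 * (L.length * (2 ^ k - 1)) + L.length := by
      have hsub : 2 ^ (k + 1) - 1 = 2 * (2 ^ k - 1) + 1 := by rw [hpows]; omega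
      rw [hsub]; ring
    rw [hq1] at hf
    set P' := pvProd ((Y.drop (i + 1)).map pvOptM) with hP'
    by_cases hc : c ∈ pvSix
    · -- marker at position i: one phase doubles the list, then the scan finds nothing
      have hph := pvLoop_phase L [] f i n c hc hxc (by simp) hin (by omega)
      rw [List.append_nil] at hph
      rw [hph]
      set L' := L.flatMap (fun x => [pvSet x i (pvPair c).1, pvSet x i (pvPair c).2]) with hL'
      simp only [List.nil_append]
      have hL'mem : ∀ y ∈ L', y.getD i ' ' ∉ pvSix := by
        intro y hy
        rcases List.mem_flatMap.mp hy with ⟨x, hx, hyx⟩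
        simp only [List.mem_cons, List.not_mem_nil, or_false] at hyx
        rcases hyx with rfl | rfl
        · rw [pvSet_getD _ (hxl x hx)]; exact pvPair_fst_not_six hc
        · rw [pvSet_getD _ (hxl x hx)]; exact pvPair_snd_not_six hc
      have hL'len : L'.length = 2 * L.length := length_flatMap_two L _ _
      obtain ⟨g, hg⟩ : ∃ g, f - L.length = g + 1 :=
        ⟨f - L.length - 1, by omega⟩
      rw [hg, pvLoop, if_pos hin, pvScan_none hL'mem]
      rw [ih (i + 1) L' g n Y hY (by omega)
        (by
          intro y hy
          rcases List.mem_flatMap.mp hy with ⟨x, hx, hyx⟩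
          simp only [List.mem_cons, List.not_mem_nil, or_false] at hyx
          have hxi := hxl x hx
          rcases hyx with rfl | rfl <;>
            exact ⟨by rw [pvSet_length _ hxi]; exact (hL x hx).1,
              by rw [pvSet_drop _ hxi]; exact hdropx x hx⟩)
        (by
          rw [hL'len]
          have hmm : 2 * L.length * (2 ^ k - 1) = 2 * (L.length * (2 ^ k - 1)) := by ring
          rw [hmm]; omega)]
      -- now both sides are flatMaps over L
      rw [hL', List.flatMap_assoc]
      apply List.flatMap_congr
      intro x hx
      have hxi := hxl x hx
      rw [hdropY, List.map_cons, pvProd,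
        show pvOptM c = [(pvPair c).1, (pvPair c).2] from by rw [pvOptM, if_pos hc]]
      simp only [List.flatMap_cons, List.flatMap_nil, List.append_nil, List.map_append,
        List.map_map, ← hP']
      rw [pvSet_take_succ _ hxi, pvSet_take_succ _ hxi]
      apply congrArg₂
      · apply List.map_congr_left; intro t _; simp [Function.comp]
      · apply List.map_congr_left; intro t _; simp [Function.comp]
    · -- ordinary position: the scan finds nothing and i advances
      have hnone : pvScan L i = none := pvScan_none (fun x hx => by rw [hxc x hx]; exact hc)
      obtain ⟨f', rfl⟩ : ∃ f', f = f' + 1 := ⟨f - 1, by omega⟩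
      rw [pvLoop, if_pos hin, hnone]
      rw [ih (i + 1) L f' n Y hY (by omega)
        (fun x hx => ⟨(hL x hx).1, hdropx x hx⟩)
        (by omega)]
      apply List.flatMap_congr
      intro x hx
      have hxi := hxl x hx
      have hxgi : x[i] = c := by
        have h4 := hxc x hx
        rwa [List.getD_eq_getElem?_getD, List.getElem?_eq_getElem hxi, Option.getD_some] at h4
      have htake : x.take (i + 1) = x.take i ++ [c] := by
        rw [List.take_succ, List.getElem?_eq_getElem hxi, hxgi]; rfl
      rw [hdropY, List.map_cons, pvProd,
        show pvOptM c = [c] from by rw [pvOptM, if_neg hc]]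
      simp only [List.flatMap_cons, List.flatMap_nil, List.append_nil, List.map_map, ← hP']
      apply List.map_congr_left; intro t _
      simp [Function.comp, htake]

theorem deasciify_eq (soz : String) : deasciify soz = deasciify_alt soz := by
  simp only [deasciify, deasciify_alt]
  have hfold : soz.toList.foldl (fun acc c => acc ++ [pvMark c]) [] = soz.toList.map pvMark := by
    simpa using PySem.List.foldl_append_singleton_eq_map (l := soz.toList) (f := pvMark) (acc := [])
  rw [hfold]
  set Y := soz.toList.map pvMark with hYdef
  set n := Y.length with hn
  have hloop := pvLoop_main n 0 [Y] ((n + 1) * 2 ^ n) n Y rfl (by omega)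
    (by intro x hx; simp only [List.mem_singleton] at hx; subst hx; exact ⟨rfl, rfl⟩)
    (by
      have h1 : 1 ≤ 2 ^ n := Nat.one_le_two_pow
      have h2 : n ≤ n * 2 ^ n := Nat.le_mul_of_pos_right n (by omega)
      have h3 : (n + 1) * 2 ^ n = n * 2 ^ n + 2 ^ n := by ring
      simp only [List.length_singleton, one_mul]
      omega)
  rw [hloop]
  simp only [List.flatMap_cons, List.flatMap_nil, List.append_nil, List.take_zero,
    List.drop_zero, List.nil_append, List.map_id]
  have hopts : soz.toList.map pvOpt = Y.map pvOptM := by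
    rw [hYdef, List.map_map]
    apply List.map_congr_left
    intro c _
    exact pvOpt_eq_optM_mark c
  rw [hopts]
  have hfilter : ∀ (l : List String) (p : String → Bool),
      (∀ s, p s = false) → l.filter p = [] := by
    intro l p hp
    induction l with
    | nil => rfl
    | cons a l ih => simp [List.filter, hp a, ih]
  have hid : List.map (fun t : List Char => t) (pvProd (List.map pvOptM Y)) = pvProd (List.map pvOptM Y) := by
    simp
  rw [hid, hfilter _ (fun l => List.contains [] l) (fun s => rfl),
    hfilter _ (fun w => (PySem.Set.ofList ([] : List String)).contains w) (fun s => rfl)]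

-- ===== VERDICT (by name: the statement is the Claim_ definition above) =====
theorem deasciify_spec : Claim_equal_deasciify := by
  intro soz _
  unfold Spec_deasciify
  exact deasciify_eq soz
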